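-- pv_equiv track=rewrite | github.com/yakukhno02/Lab4_Sem2 | graph_analysis.py | find_paths_of_length_2
-- ===== SOURCE A (Python) =====
-- def find_paths_of_length_2(adj_matrix):
--     n = len(adj_matrix)
--     paths = []
--     for i in range(n):
--         for j in range(n):
--             if i != j:
--                 for k in range(n):
--                     if adj_matrix[i][k] and adj_matrix[k][j]:
--                         paths.append([i + 1, k + 1, j + 1])
--     return paths
-- ===== SOURCE B (Python) =====
-- def find_paths_of_length_2(adj_matrix):
--     n = len(adj_matrix)
--     succ = [[k for k in range(n) if adj_matrix[i][k]] for i in range(n)]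
--     paths = []
--     for i in range(n):
--         cands = [(j, k) for k in succ[i] for j in succ[k] if i != j]
--         cands.sort()
--         paths.extend([i + 1, k + 1, j + 1] for j, k in cands)
--     return paths
-- ===== Notes on version B (the rewrite author's own statement) =====
-- stated objective: alternative
-- what changed: B replaces A's triple nested matrix scan by a join on precomputed successor lists: per start node it enumerates successor-of-successor (end, middle) candidate pairs (an edge join over the middle vertex, never re-reading the matrix in the emission phase) and sorts them to restore A's (i, j, k) emission order; Pre_ excludes ragged matrices (a row shorter than the number of rows): there A almost always raises IndexError, except the one-row case where A skips all indexing while B's successor precomputation still indexes and raises.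
-- outside the precondition, e.g. on find_paths_of_length_2([[]]): A returns [], B raises IndexError
import Mathlib
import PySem

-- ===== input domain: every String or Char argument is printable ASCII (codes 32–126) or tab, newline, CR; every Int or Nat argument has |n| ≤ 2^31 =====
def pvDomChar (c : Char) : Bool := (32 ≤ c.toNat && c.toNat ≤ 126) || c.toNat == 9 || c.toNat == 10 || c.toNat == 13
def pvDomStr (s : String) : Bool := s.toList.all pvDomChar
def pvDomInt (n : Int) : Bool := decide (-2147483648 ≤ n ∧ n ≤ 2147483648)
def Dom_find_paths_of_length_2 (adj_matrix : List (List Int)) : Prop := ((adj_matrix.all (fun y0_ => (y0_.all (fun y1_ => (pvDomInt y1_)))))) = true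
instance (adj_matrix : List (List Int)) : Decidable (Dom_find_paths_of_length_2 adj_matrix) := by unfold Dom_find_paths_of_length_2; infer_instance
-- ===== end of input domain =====

-- B joins the precomputed successor lists over the middle vertex (successor-of-successor
-- candidate pairs, sorted back into A's emission order) instead of A's triple nested
-- matrix scan (objective: alternative).

-- adj_matrix[i][k], total form; under Pre_ every index either port uses is in range
def pvEntry (adj_matrix : List (List Int)) (i k : Int) : Int :=
  PySem.List.pyGetD (PySem.List.pyGetD adj_matrix i []) k 0

-- ===== PORT A =====
def find_paths_of_length_2 (adj_matrix : List (List Int)) : List (List Int) :=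
  let n : Int := adj_matrix.length
  (PySem.List.pyRange 0 n 1).foldl (fun acc i =>
    (PySem.List.pyRange 0 n 1).foldl (fun acc j =>
      if i ≠ j then
        (PySem.List.pyRange 0 n 1).foldl (fun acc k =>
          if pvEntry adj_matrix i k ≠ 0 ∧ pvEntry adj_matrix k j ≠ 0 then
            acc ++ [[i + 1, k + 1, j + 1]]
          else acc) acc
      else acc) acc) []

-- ===== PORT B =====
def find_paths_of_length_2_alt (adj_matrix : List (List Int)) : List (List Int) :=
  let n : Int := adj_matrix.length
  let succ : List (List Int) :=
    (PySem.List.pyRange 0 n 1).map (fun i =>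
      (PySem.List.pyRange 0 n 1).filter (fun k => decide (pvEntry adj_matrix i k ≠ 0)))
  (PySem.List.pyRange 0 n 1).foldl (fun paths i =>
    let cands : List (Int × Int) :=
      (PySem.List.pyGetD succ i []).flatMap (fun k =>
        ((PySem.List.pyGetD succ k []).filter (fun j => decide (i ≠ j))).map (fun j => (j, k)))
    paths ++ (PySem.List.sorted2 cands Prod.fst Prod.snd false).map
      (fun p => [i + 1, p.2 + 1, p.1 + 1])) []

-- ===== PRECONDITION & SPEC =====
-- Pre_ excludes ragged matrices (a row shorter than the number of rows): A raises
-- IndexError on them except in the one-row case (e.g. [[]]) where A returns an empty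
-- result without ever indexing while B's successor precomputation still indexes and raises.
def Pre_find_paths_of_length_2 (adj_matrix : List (List Int)) : Prop :=
  ∀ row ∈ adj_matrix, adj_matrix.length ≤ row.length
instance (adj_matrix : List (List Int)) : Decidable (Pre_find_paths_of_length_2 adj_matrix) := by
  unfold Pre_find_paths_of_length_2; infer_instance

def pvWitness_find_paths_of_length_2 : List (List Int) := [[0, 1, 0], [1, 0, 1], [1, 1, 0]]

def Spec_find_paths_of_length_2 (adj_matrix : List (List Int)) (out : List (List Int)) : Prop :=
  out = find_paths_of_length_2_alt adj_matrix
instance (adj_matrix : List (List Int)) (out : List (List Int)) :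
    Decidable (Spec_find_paths_of_length_2 adj_matrix out) := by
  unfold Spec_find_paths_of_length_2; infer_instance

-- ===== CLAIM (what is proved, stated in full; the proofs are below) =====
def Claim_equal_find_paths_of_length_2 : Prop :=
  ∀ (adj_matrix : List (List Int)), Dom_find_paths_of_length_2 adj_matrix →
    Pre_find_paths_of_length_2 adj_matrix →
    Spec_find_paths_of_length_2 adj_matrix (find_paths_of_length_2 adj_matrix)

-- ===== LEMMAS AND PROOFS =====

-- the Boolean lexicographic order sorted2 sorts by when the key is (Prod.fst, Prod.snd)
def pvBef (a b : Int × Int) : Bool :=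
  decide (a.1 < b.1) || (!decide (b.1 < a.1) && decide (a.2 < b.2))

-- B's candidate list for start node i (successor lists already substituted)
def pvC (adj : List (List Int)) (n i : Int) : List (Int × Int) :=
  ((PySem.List.pyRange 0 n 1).filter (fun k => decide (pvEntry adj i k ≠ 0))).flatMap
    (fun k =>
      (((PySem.List.pyRange 0 n 1).filter (fun x => decide (pvEntry adj k x ≠ 0))).filter
        (fun j => decide (i ≠ j))).map (fun j => (j, k)))

-- the same multiset of (j, k) pairs in A's lexicographic emission order
def pvT (adj : List (List Int)) (n i : Int) : List (Int × Int) :=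
  (PySem.List.pyRange 0 n 1).flatMap (fun j =>
    if i ≠ j then
      ((PySem.List.pyRange 0 n 1).filter
        (fun k => decide (pvEntry adj i k ≠ 0 ∧ pvEntry adj k j ≠ 0))).map (fun k => (j, k))
    else [])

theorem pv_bef_asymm (a b : Int × Int) (h : pvBef a b = true) : pvBef b a = false := by
  simp [pvBef] at *; omega

theorem pv_bef_trans (a b c : Int × Int) (h1 : pvBef a b = true) (h2 : pvBef b c = true) :
    pvBef a c = true := by
  simp [pvBef] at *; omega

theorem pv_insert_pw (x : Int × Int) (acc : List (Int × Int))
    (h : acc.Pairwise (fun a b => pvBef b a = false)) :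
    (PySem.List.insertBy pvBef x acc).Pairwise (fun a b => pvBef b a = false) := by
  induction acc with
  | nil => simp [PySem.List.insertBy]
  | cons y ys ih =>
    by_cases hxy : pvBef x y = true
    · rw [show PySem.List.insertBy pvBef x (y :: ys) = x :: y :: ys by
        simp [PySem.List.insertBy, hxy]]
      refine List.pairwise_cons.2 ⟨?_, h⟩
      intro z hz
      rcases List.mem_cons.1 hz with rfl | hz
      · exact pv_bef_asymm _ _ hxy
      · by_contra hzx
        have hzx' : pvBef z x = true := by revert hzx; cases pvBef z x <;> simp
        have := pv_bef_trans _ _ _ hzx' hxy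
        have := (List.pairwise_cons.1 h).1 z hz
        simp_all
    · rw [show PySem.List.insertBy pvBef x (y :: ys) = y :: PySem.List.insertBy pvBef x ys by
        simp [PySem.List.insertBy, hxy]]
      refine List.pairwise_cons.2 ⟨?_, ih (List.pairwise_cons.1 h).2⟩
      intro z hz
      rcases (PySem.List.mem_insertBy _ _ _ _).1 hz with rfl | hz
      · simpa using hxy
      · exact (List.pairwise_cons.1 h).1 z hz

theorem pv_foldl_insert_pw (xs : List (Int × Int)) : ∀ (acc : List (Int × Int)),
    acc.Pairwise (fun a b => pvBef b a = false) →
    (xs.foldl (fun a x => PySem.List.insertBy pvBef x a) acc).Pairwise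
      (fun a b => pvBef b a = false) := by
  induction xs with
  | nil => intro acc h; simpa using h
  | cons x xs ih => intro acc h; exact ih _ (pv_insert_pw x acc h)

theorem pv_sorted2_pw (xs : List (Int × Int)) :
    (PySem.List.sorted2 xs Prod.fst Prod.snd false).Pairwise
      (fun a b => pvBef b a = false) := by
  have h : PySem.List.sorted2 xs Prod.fst Prod.snd false
      = xs.foldl (fun a x => PySem.List.insertBy pvBef x a) [] := rfl
  rw [h]
  exact pv_foldl_insert_pw xs [] (by simp)

-- a strictly pvBef-increasing rearrangement is unique
theorem pv_uniq : ∀ (l2 l1 : List (Int × Int)), l1.Perm l2 →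
    l1.Pairwise (fun a b => pvBef b a = false) →
    l2.Pairwise (fun a b => pvBef a b = true) → l1 = l2 := by
  intro l2
  induction l2 with
  | nil => intro l1 hp _ _; exact hp.eq_nil
  | cons b t2 ih =>
    intro l1 hp h1 h2
    cases l1 with
    | nil => simpa using hp.length_eq
    | cons a t1 =>
      have hab : a = b := by
        by_contra hne
        have hbl : b ∈ a :: t1 := hp.mem_iff.2 (List.mem_cons_self ..)
        have hal : a ∈ b :: t2 := hp.mem_iff.1 (List.mem_cons_self ..)
        have hb1 : b ∈ t1 := by
          rcases List.mem_cons.1 hbl with h | h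
          · exact absurd h.symm hne
          · exact h
        have ha2 : a ∈ t2 := by
          rcases List.mem_cons.1 hal with h | h
          · exact absurd h hne
          · exact h
        have hx := (List.pairwise_cons.1 h1).1 b hb1
        have hy := (List.pairwise_cons.1 h2).1 a ha2
        simp_all
      subst hab
      rw [ih t1 hp.cons_inv (List.pairwise_cons.1 h1).2 (List.pairwise_cons.1 h2).2]

theorem pvT_pairwise (adj : List (List Int)) (n i : Int) :
    (pvT adj n i).Pairwise (fun a b => pvBef a b = true) := by
  unfold pvT
  rw [List.pairwise_flatMap]
  constructor
  · intro j hj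
    split_ifs with hij
    · rw [List.pairwise_map]
      refine ((PySem.List.pairwise_lt_pyRange_one 0 n).filter _).imp ?_
      intro k k' hkk'
      simp [pvBef]; omega
    · simp
  · refine (PySem.List.pairwise_lt_pyRange_one 0 n).imp ?_
    intro j j' hjj' x hx y hy
    simp only [List.mem_ite_nil_right, List.mem_map] at hx hy
    obtain ⟨-, k, -, rfl⟩ := hx
    obtain ⟨-, k', -, rfl⟩ := hy
    simp [pvBef]; omega

theorem pvT_nodup (adj : List (List Int)) (n i : Int) : (pvT adj n i).Nodup := by
  unfold pvT
  rw [List.nodup_flatMap]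
  constructor
  · intro j hj
    split_ifs with hij
    · exact ((PySem.List.nodup_pyRange_one 0 n).filter _).map
        (fun a b h => by simpa using congrArg Prod.snd h)
    · simp
  · refine ((PySem.List.pairwise_lt_pyRange_one 0 n).imp ?_)
    intro j j' hjj' x hx hy
    simp only [List.mem_ite_nil_right, List.mem_map] at hx hy
    obtain ⟨-, k, -, rfl⟩ := hx
    obtain ⟨-, k', -, h⟩ := hy
    have : j' = j := by simpa using congrArg Prod.fst h
    omega

theorem pvC_nodup (adj : List (List Int)) (n i : Int) : (pvC adj n i).Nodup := by
  unfold pvC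
  rw [List.nodup_flatMap]
  constructor
  · intro k hk
    exact ((((PySem.List.nodup_pyRange_one 0 n).filter _).filter _).map
      (fun a b h => by simpa using congrArg Prod.fst h))
  · refine (((PySem.List.pairwise_lt_pyRange_one 0 n).filter _).imp ?_)
    intro k k' hkk' x hx hy
    rcases List.mem_map.1 hx with ⟨j, _, rfl⟩
    rcases List.mem_map.1 hy with ⟨j', _, h⟩
    have : k' = k := by simpa using congrArg Prod.snd h
    omega

theorem pv_perm (adj : List (List Int)) (n i : Int) : (pvT adj n i).Perm (pvC adj n i) := by
  rw [List.perm_ext_iff_of_nodup (pvT_nodup adj n i) (pvC_nodup adj n i)]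
  intro x
  unfold pvT pvC
  simp only [List.mem_flatMap, List.mem_filter, List.mem_map, List.mem_ite_nil_right,
    PySem.List.mem_pyRange_one, decide_eq_true_eq]
  constructor
  · rintro ⟨j, hj, hij, k, ⟨⟨hk, ⟨hik, hkj⟩⟩, rfl⟩⟩
    exact ⟨k, ⟨hk, hik⟩, j, ⟨⟨⟨hj, hkj⟩, hij⟩, rfl⟩⟩
  · rintro ⟨k, ⟨hk, hik⟩, j, ⟨⟨⟨hj, hkj⟩, hij⟩, rfl⟩⟩
    exact ⟨j, hj, hij, k, ⟨⟨hk, ⟨hik, hkj⟩⟩, rfl⟩⟩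

theorem pv_sorted_eq (adj : List (List Int)) (n i : Int) :
    PySem.List.sorted2 (pvC adj n i) Prod.fst Prod.snd false = pvT adj n i :=
  pv_uniq (pvT adj n i) _
    ((PySem.List.sorted2_perm (pvC adj n i) Prod.fst Prod.snd false).trans
      (pv_perm adj n i).symm)
    (pv_sorted2_pw _) (pvT_pairwise adj n i)

theorem pv_main (adj_matrix : List (List Int)) :
    find_paths_of_length_2 adj_matrix = find_paths_of_length_2_alt adj_matrix := by
  unfold find_paths_of_length_2 find_paths_of_length_2_alt
  dsimp only
  refine PySem.List.foldl_congr_mem _ _ _ _ ?_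
  intro acc i hi
  have hi' := (PySem.List.mem_pyRange_one).1 hi
  rw [PySem.List.pyGetD_map_pyRange_of_nonneg _ _ _ _ hi'.1 hi'.2]
  rw [List.flatMap_congr (f := fun k =>
        ((PySem.List.pyGetD
            ((PySem.List.pyRange 0 (adj_matrix.length : Int) 1).map (fun i =>
              (PySem.List.pyRange 0 (adj_matrix.length : Int) 1).filter
                (fun k => decide (pvEntry adj_matrix i k ≠ 0)))) k []).filter
          (fun j => decide (i ≠ j))).map (fun j => (j, k)))
      (g := fun k =>
        (((PySem.List.pyRange 0 (adj_matrix.length : Int) 1).filter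
            (fun x => decide (pvEntry adj_matrix k x ≠ 0))).filter
          (fun j => decide (i ≠ j))).map (fun j => (j, k)))
      (fun k hk => by
        have hk' := (PySem.List.mem_pyRange_one).1 (List.mem_of_mem_filter hk)
        dsimp only
        rw [PySem.List.pyGetD_map_pyRange_of_nonneg _ _ _ _ hk'.1 hk'.2])]
  rw [show ((PySem.List.pyRange 0 (adj_matrix.length : Int) 1).filter
        (fun k => decide (pvEntry adj_matrix i k ≠ 0))).flatMap
      (fun k =>
        (((PySem.List.pyRange 0 (adj_matrix.length : Int) 1).filter
            (fun x => decide (pvEntry adj_matrix k x ≠ 0))).filter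
          (fun j => decide (i ≠ j))).map (fun j => (j, k)))
      = pvC adj_matrix (adj_matrix.length : Int) i from rfl]
  rw [pv_sorted_eq]
  -- A's inner double loop produces acc ++ pvT mapped to the output triples
  have hfun : (fun (acc : List (List Int)) j =>
      if i ≠ j then
        (PySem.List.pyRange 0 (adj_matrix.length : Int) 1).foldl (fun acc k =>
          if pvEntry adj_matrix i k ≠ 0 ∧ pvEntry adj_matrix k j ≠ 0 then
            acc ++ [[i + 1, k + 1, j + 1]]
          else acc) acc
      else acc)
      = (fun acc j => acc ++
          (if i ≠ j then
            ((PySem.List.pyRange 0 (adj_matrix.length : Int) 1).filter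
              (fun k => decide (pvEntry adj_matrix i k ≠ 0 ∧ pvEntry adj_matrix k j ≠ 0))).map
              (fun k => [i + 1, k + 1, j + 1])
          else [])) := by
    funext acc j
    split_ifs with h
    · exact PySem.List.foldl_append_ite _ _ _ _
    · simp
  rw [hfun, PySem.List.foldl_append_eq_flatMap]
  unfold pvT
  rw [List.map_flatMap]
  refine congrArg (acc ++ ·) (List.flatMap_congr ?_)
  intro j hj
  split_ifs with h
  · rw [List.map_map]; rfl
  · rfl

-- ===== VERDICT (by name: the statement is the Claim_ definition above) =====
theorem find_paths_of_length_2_spec : Claim_equal_find_paths_of_length_2 := by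
  intro m _ _
  unfold Spec_find_paths_of_length_2
  exact pv_main m
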